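-- pv_equiv track=rewrite | github.com/Firkraag/leetcode | maxProfit_123.py | computeLeft
-- ===== SOURCE A (Python) =====
-- def computeLeft(prices):
--     n = len(prices)
--     one = [0] * n
--     minimum = prices[0]
--     for i in range(1, n):
--         if minimum < prices[i]:
--             one[i] = max(one[i - 1], prices[i] - minimum)
--         else:
--             minimum = prices[i]
--             one[i] = one[i - 1]
--     return one
-- ===== SOURCE B (Python) =====
-- def computeLeft(prices):
--     mins = [prices[0]]
--     for p in prices[1:]:
--         mins.append(min(mins[-1], p))
--     one = [0]
--     for p, m in zip(prices[1:], mins[1:]):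
--         one.append(max(one[-1], p - m))
--     return one
-- ===== Notes on version B (the rewrite author's own statement) =====
-- stated objective: alternative
-- what changed: Replaces A's single branchy loop that carries a running minimum and conditionally updates it with two separate unconditional passes: first a prefix-minimum array is built, then the profit array is computed as the max of the previous profit and price minus prefix minimum, with no branching.
import Mathlib
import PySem

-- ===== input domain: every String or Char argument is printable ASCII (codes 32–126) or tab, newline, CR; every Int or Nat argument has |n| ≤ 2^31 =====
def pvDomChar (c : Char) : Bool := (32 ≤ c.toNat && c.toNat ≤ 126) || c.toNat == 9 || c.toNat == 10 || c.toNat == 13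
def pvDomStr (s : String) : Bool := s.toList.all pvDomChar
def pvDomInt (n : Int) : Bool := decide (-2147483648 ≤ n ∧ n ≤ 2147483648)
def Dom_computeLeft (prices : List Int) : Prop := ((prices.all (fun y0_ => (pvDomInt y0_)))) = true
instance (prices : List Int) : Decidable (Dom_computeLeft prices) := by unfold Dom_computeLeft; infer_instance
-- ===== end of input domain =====

-- B replaces A's single branchy loop with two unconditional passes (prefix minima, then profits); same O(n) cost.

-- ===== PORT A =====
def computeLeft (prices : List Int) : List Int :=
  let n : Int := prices.length
  let one : List Int := List.replicate prices.length 0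
  let minimum : Int := PySem.List.pyGetD prices 0 0
  ((PySem.List.pyRange 1 n 1).foldl
    (fun (st : List Int × Int) (i : Int) =>
      if st.2 < PySem.List.pyGetD prices i 0 then
        (PySem.List.pySetD st.1 i
          (max (PySem.List.pyGetD st.1 (i - 1) 0) (PySem.List.pyGetD prices i 0 - st.2)), st.2)
      else
        (PySem.List.pySetD st.1 i (PySem.List.pyGetD st.1 (i - 1) 0),
          PySem.List.pyGetD prices i 0))
    (one, minimum)).1

-- ===== PORT B =====
def computeLeft_alt (prices : List Int) : List Int :=
  let mins : List Int :=
    (PySem.List.slice prices (some 1) none).foldl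
      (fun (mins : List Int) (p : Int) => mins ++ [min (PySem.List.pyGetD mins (-1) 0) p])
      [PySem.List.pyGetD prices 0 0]
  ((PySem.List.slice prices (some 1) none).zip (PySem.List.slice mins (some 1) none)).foldl
    (fun (one : List Int) (pm : Int × Int) =>
      one ++ [max (PySem.List.pyGetD one (-1) 0) (pm.1 - pm.2)])
    [(0 : Int)]

-- ===== PRECONDITION & SPEC =====
-- Pre_ excludes only the empty list, on which Python A raises IndexError at prices[0].
def Pre_computeLeft (prices : List Int) : Prop := prices ≠ []
instance (prices : List Int) : Decidable (Pre_computeLeft prices) := by unfold Pre_computeLeft; infer_instance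
def pvWitness_computeLeft : List Int := ([1, 2])

def Spec_computeLeft (prices : List Int) (out : List Int) : Prop := out = computeLeft_alt prices
instance (prices : List Int) (out : List Int) : Decidable (Spec_computeLeft prices out) := by unfold Spec_computeLeft; infer_instance

-- ===== CLAIM (what is proved, stated in full; the proofs are below) =====
def Claim_equal_computeLeft : Prop := ∀ (prices : List Int), Dom_computeLeft prices → Pre_computeLeft prices → Spec_computeLeft prices (computeLeft prices)

-- ===== LEMMAS AND PROOFS =====

-- reference recursions used only by the proofs
def refA (m l : Int) : List Int → List Int
  | [] => []
  | p :: ps => if m < p then (max l (p - m)) :: refA m (max l (p - m)) ps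
               else l :: refA p l ps

def refB (m l : Int) : List Int → List Int
  | [] => []
  | p :: ps => (max l (p - min m p)) :: refB (min m p) (max l (p - min m p)) ps

def scanMin (m : Int) : List Int → List Int
  | [] => []
  | p :: ps => min m p :: scanMin (min m p) ps

def refZip (l : Int) : List (Int × Int) → List Int
  | [] => []
  | pm :: rest => (max l (pm.1 - pm.2)) :: refZip (max l (pm.1 - pm.2)) rest

lemma set_append_len {α : Type} (xs ys : List α) (v : α) :
    (xs ++ ys).set xs.length v = xs ++ ys.set 0 v := by
  induction xs with
  | nil => simp
  | cons a xs ih => simp [ih]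

lemma A_loop (prices : List Int) : ∀ (rest front : List Int) (m l : Int),
    1 ≤ front.length →
    prices.length = front.length + rest.length →
    prices.drop front.length = rest →
    front.getLast? = some l →
    ((PySem.List.pyRange (front.length : Int) (prices.length : Int) 1).foldl
      (fun (st : List Int × Int) (i : Int) =>
        if st.2 < PySem.List.pyGetD prices i 0 then
          (PySem.List.pySetD st.1 i
            (max (PySem.List.pyGetD st.1 (i - 1) 0) (PySem.List.pyGetD prices i 0 - st.2)), st.2)
        else
          (PySem.List.pySetD st.1 i (PySem.List.pyGetD st.1 (i - 1) 0),
            PySem.List.pyGetD prices i 0))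
      (front ++ List.replicate rest.length 0, m)).1
      = front ++ refA m l rest := by
  intro rest
  induction rest with
  | nil =>
    intro front m l h1 hlen hdrop hlast
    have hle : prices.length = front.length := by simpa using hlen
    rw [PySem.List.pyRange_one_eq_nil (by exact_mod_cast hle.le)]
    simp [refA]
  | cons p ps ih =>
    intro front m l h1 hlen hdrop hlast
    have hlt : (front.length : Int) < (prices.length : Int) := by
      simp at hlen ⊢; omega
    rw [PySem.List.pyRange_one_cons hlt]
    rw [List.foldl_cons]
    have hp : PySem.List.pyGetD prices (front.length : Int) 0 = p := by
      rw [PySem.List.pyGetD_natCast]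
      have : prices[front.length]? = some p := by
        rw [← List.head?_drop, hdrop]; rfl
      simp [List.getD, this]
    have hgetprev : PySem.List.pyGetD (front ++ List.replicate (p :: ps).length 0)
        ((front.length : Int) - 1) 0 = l := by
      have hc : ((front.length : Int) - 1) = ((front.length - 1 : Nat) : Int) := by omega
      rw [hc, PySem.List.pyGetD_natCast]
      have hlt' : front.length - 1 < front.length := by omega
      have h2 : ∀ ys : List Int, (front ++ ys)[front.length - 1]? =
          front[front.length - 1]? := fun ys => List.getElem?_append_left hlt'
      have h3 : front[front.length - 1]? = some l := by
        rw [← List.getLast?_eq_getElem?]; exact hlast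
      simp [List.getD, h2, h3]
    have hset : ∀ v : Int, PySem.List.pySetD (front ++ List.replicate (p :: ps).length 0)
        (front.length : Int) v = (front ++ [v]) ++ List.replicate ps.length 0 := by
      intro v
      rw [PySem.List.pySetD_natCast, set_append_len]
      simp [List.replicate_succ]
    have hstep : ∀ (front' : List Int) (v m' : Int), front'.length = front.length + 1 →
        prices.drop front'.length = ps → front'.getLast? = some v →
        ((PySem.List.pyRange ((front.length : Int) + 1) (prices.length : Int) 1).foldl
          (fun (st : List Int × Int) (i : Int) =>
            if st.2 < PySem.List.pyGetD prices i 0 then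
              (PySem.List.pySetD st.1 i
                (max (PySem.List.pyGetD st.1 (i - 1) 0) (PySem.List.pyGetD prices i 0 - st.2)), st.2)
            else
              (PySem.List.pySetD st.1 i (PySem.List.pyGetD st.1 (i - 1) 0),
                PySem.List.pyGetD prices i 0))
          (front' ++ List.replicate ps.length 0, m')).1
          = front' ++ refA m' v ps := by
      intro front' v m' hfl hdrop' hlast'
      have hcast : ((front.length : Int) + 1) = ((front'.length : Nat) : Int) := by
        rw [hfl]; push_cast; ring
      rw [hcast]
      exact ih front' m' v (by omega) (by simp at hlen ⊢; omega) hdrop' hlast'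
    have hdroptail : prices.drop (front.length + 1) = ps := by
      have := congrArg List.tail hdrop
      simpa [List.tail_drop] using this
    by_cases hbr : m < p
    · simp only [hp, hgetprev, hbr, if_pos, hset]
      rw [hstep (front ++ [max l (p - m)]) (max l (p - m)) m (by simp) (by simpa using hdroptail) (by simp)]
      simp [refA, hbr]
    · simp only [hp, hgetprev, hbr, hset, if_false]
      rw [hstep (front ++ [l]) l p (by simp) (by simpa using hdroptail) (by simp)]
      simp [refA, hbr]

lemma B_mins : ∀ (ps acc : List Int) (m : Int),
    ps.foldl (fun (mins : List Int) (p : Int) =>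
        mins ++ [min (PySem.List.pyGetD mins (-1) 0) p]) (acc ++ [m])
      = acc ++ [m] ++ scanMin m ps := by
  intro ps
  induction ps with
  | nil => intro acc m; simp [scanMin]
  | cons p ps ih =>
    intro acc m
    rw [List.foldl_cons, PySem.List.pyGetD_neg_one_append_singleton]
    rw [ih (acc ++ [m]) (min m p)]
    simp [scanMin]

lemma B_one : ∀ (pairs : List (Int × Int)) (acc : List Int) (l : Int),
    pairs.foldl (fun (one : List Int) (pm : Int × Int) =>
        one ++ [max (PySem.List.pyGetD one (-1) 0) (pm.1 - pm.2)]) (acc ++ [l])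
      = acc ++ [l] ++ refZip l pairs := by
  intro pairs
  induction pairs with
  | nil => intro acc l; simp [refZip]
  | cons pm rest ih =>
    intro acc l
    rw [List.foldl_cons, PySem.List.pyGetD_neg_one_append_singleton]
    rw [ih (acc ++ [l]) (max l (pm.1 - pm.2))]
    simp [refZip]

lemma refZip_zip_scanMin : ∀ (ps : List Int) (m l : Int),
    refZip l (ps.zip (scanMin m ps)) = refB m l ps := by
  intro ps
  induction ps with
  | nil => intro m l; simp [refZip, refB, scanMin]
  | cons p ps ih =>
    intro m l
    simp only [scanMin, List.zip_cons_cons, refZip, refB]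
    rw [ih]

lemma refA_eq_refB : ∀ (ps : List Int) (m l : Int), 0 ≤ l → refA m l ps = refB m l ps := by
  intro ps
  induction ps with
  | nil => intro m l _; simp [refA, refB]
  | cons p ps ih =>
    intro m l hl
    by_cases hbr : m < p
    · have hmin : min m p = m := min_eq_left (le_of_lt hbr)
      simp only [refA, refB, hbr, if_pos, hmin]
      rw [ih m (max l (p - m)) (le_trans hl (le_max_left _ _))]
    · have hmin : min m p = p := min_eq_right (le_of_not_gt hbr)
      have hl0 : max l (0 : Int) = l := max_eq_left hl
      simp only [refA, refB, hbr, hmin, sub_self, hl0, if_false]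
      rw [ih p l hl]

lemma computeLeft_eq (p0 : Int) (rest : List Int) :
    computeLeft (p0 :: rest) = 0 :: refA p0 0 rest := by
  unfold computeLeft
  simp only [PySem.List.pyGetD_zero_cons]
  have hrep : List.replicate (p0 :: rest).length (0 : Int)
      = [0] ++ List.replicate rest.length 0 := rfl
  rw [hrep]
  have h := A_loop (p0 :: rest) rest [0] p0 0 (by simp) (by simp [Nat.add_comm]) (by simp) (by simp)
  simpa using h

lemma computeLeft_alt_eq (p0 : Int) (rest : List Int) :
    computeLeft_alt (p0 :: rest) = 0 :: refB p0 0 rest := by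
  unfold computeLeft_alt
  simp only [PySem.List.slice_from_one, PySem.List.pyGetD_zero_cons, List.tail_cons]
  have hmins := B_mins rest [] p0
  simp only [List.nil_append] at hmins
  rw [hmins]
  simp only [List.cons_append, List.nil_append, List.tail_cons]
  have hone := B_one (rest.zip (scanMin p0 rest)) [] 0
  simp only [List.nil_append] at hone
  rw [hone, refZip_zip_scanMin]
  simp

-- ===== VERDICT (by name: the statement is the Claim_ definition above) =====
theorem computeLeft_spec : Claim_equal_computeLeft := by
  intro prices _ hpre
  unfold Spec_computeLeft
  cases prices with
  | nil => exact absurd rfl hpre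
  | cons p0 rest =>
    rw [computeLeft_eq, computeLeft_alt_eq, refA_eq_refB rest p0 0 le_rfl]
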